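-- pv_equiv track=rewrite | github.com/Seongho-Bae/newsdom-api | tests/test_workflow_security.py | _has_pull_request_branch_filter
-- ===== SOURCE A (Python) =====
-- def _has_pull_request_branch_filter(text: str) -> bool:
--     in_pull_request = False
--     pull_request_indent = None
--
--     for line in text.splitlines():
--         stripped = line.strip()
--         indent = len(line) - len(line.lstrip())
--
--         if stripped.startswith("pull_request:"):
--             in_pull_request = True
--             pull_request_indent = indent
--             continue
--
--         if in_pull_request:
--             if stripped and indent <= (pull_request_indent or 0):
--                 in_pull_request = False
--                 pull_request_indent = None
--                 continue
--
--             if stripped.startswith("branches:") or stripped.startswith(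
--                 "branches-ignore:"
--             ):
--                 return True
--
--     return False
-- ===== SOURCE B (Python) =====
-- def _has_pull_request_branch_filter(text: str) -> bool:
--     # Pass 1: collect the bodies (stripped lines) of every pull_request: block.
--     blocks = []
--     current = None  # (block indent, list of stripped body lines) of the open block
--     for line in text.splitlines():
--         stripped = line.strip()
--         indent = len(line) - len(line.lstrip())
--         if stripped.startswith("pull_request:"):
--             if current is not None:
--                 blocks.append(current[1])
--             current = (indent, [])
--         elif current is not None:
--             if stripped and indent <= current[0]:
--                 blocks.append(current[1])
--                 current = None
--             else:
--                 current[1].append(stripped)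
--     if current is not None:
--         blocks.append(current[1])
--     # Pass 2: does any collected block carry a branch filter?
--     return any(
--         s.startswith("branches:") or s.startswith("branches-ignore:")
--         for block in blocks
--         for s in block
--     )
-- ===== Notes on version B (the rewrite author's own statement) =====
-- stated objective: alternative
-- what changed: Replaced A's interleaved state machine with an early return by a two-pass decomposition: a first pass collects the body lines of every pull_request: block, a second pass tests the collected blocks for a branches:/branches-ignore: line.
import Mathlib
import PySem

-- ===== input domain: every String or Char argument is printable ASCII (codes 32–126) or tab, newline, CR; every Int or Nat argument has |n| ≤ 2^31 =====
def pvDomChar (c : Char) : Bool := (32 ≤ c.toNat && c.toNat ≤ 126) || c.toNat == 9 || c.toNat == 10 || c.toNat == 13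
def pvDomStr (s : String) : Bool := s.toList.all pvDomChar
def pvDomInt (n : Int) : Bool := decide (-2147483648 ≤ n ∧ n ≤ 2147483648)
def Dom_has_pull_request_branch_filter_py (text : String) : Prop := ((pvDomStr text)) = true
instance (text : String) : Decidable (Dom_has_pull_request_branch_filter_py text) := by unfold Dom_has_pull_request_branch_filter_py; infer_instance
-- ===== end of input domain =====

-- B collects all pull_request block bodies in a first pass and tests them for a
-- branch filter in a second pass, instead of A's interleaved state machine with
-- an early return; objective: alternative decomposition (same cost).

-- ===== PORT A =====
-- A's single state machine: in_pull_request plus the remembered indent,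
-- returning True the moment a branches line is seen inside the block.
def pvALoop (lines : List String) (inPR : Bool) (pri : Option Int) : Bool :=
  match lines with
  | [] => false
  | line :: rest =>
    let stripped := PySem.Str.strip line
    let indent : Int := PySem.Str.len line - PySem.Str.len (PySem.Str.lstrip line)
    if PySem.Str.startswith stripped "pull_request:" then
      pvALoop rest true (some indent)
    else if inPR then
      if stripped != "" && decide (indent ≤ (pri.getD 0)) then
        pvALoop rest false none
      else if PySem.Str.startswith stripped "branches:" ||
              PySem.Str.startswith stripped "branches-ignore:" then
        true
      else pvALoop rest inPR pri
    else pvALoop rest inPR pri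

def has_pull_request_branch_filter_py (text : String) : Bool :=
  pvALoop (PySem.Str.splitlines text) false none

-- ===== PORT B =====
def pvPred (s : String) : Bool :=
  PySem.Str.startswith s "branches:" || PySem.Str.startswith s "branches-ignore:"

-- Pass 1: collect the bodies (stripped lines) of every pull_request: block.
def pvBLoop (lines : List String) (cur : Option (Int × List String))
    (blocks : List (List String)) : List (List String) :=
  match lines with
  | [] =>
    match cur with
    | none => blocks
    | some c => blocks ++ [c.2]
  | line :: rest =>
    let stripped := PySem.Str.strip line
    let indent : Int := PySem.Str.len line - PySem.Str.len (PySem.Str.lstrip line)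
    if PySem.Str.startswith stripped "pull_request:" then
      match cur with
      | none => pvBLoop rest (some (indent, [])) blocks
      | some c => pvBLoop rest (some (indent, [])) (blocks ++ [c.2])
    else
      match cur with
      | none => pvBLoop rest none blocks
      | some c =>
        if stripped != "" && decide (indent ≤ c.1) then
          pvBLoop rest none (blocks ++ [c.2])
        else
          pvBLoop rest (some (c.1, c.2 ++ [stripped])) blocks

-- Pass 2: does any collected block carry a branch filter?
def has_pull_request_branch_filter_py_alt (text : String) : Bool :=
  (pvBLoop (PySem.Str.splitlines text) none []).any (fun b => b.any pvPred)

-- ===== PRECONDITION & SPEC =====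
def Spec_has_pull_request_branch_filter_py (text : String) (out : Bool) : Prop := out = has_pull_request_branch_filter_py_alt text
instance (text : String) (out : Bool) : Decidable (Spec_has_pull_request_branch_filter_py text out) := by unfold Spec_has_pull_request_branch_filter_py; infer_instance

-- ===== CLAIM (what is proved, stated in full; the proofs are below) =====
def Claim_equal_has_pull_request_branch_filter_py : Prop := ∀ (text : String), Dom_has_pull_request_branch_filter_py text → Spec_has_pull_request_branch_filter_py text (has_pull_request_branch_filter_py text)

-- ===== LEMMAS AND PROOFS =====

def pvAnyBr (blocks : List (List String)) : Bool := blocks.any (fun b => b.any pvPred)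

-- Lines already stored in the accumulator or in the open block survive to the output.
lemma pvBLoop_persist : ∀ (lines : List String) (cur : Option (Int × List String))
    (blocks : List (List String)),
    (pvAnyBr blocks || (match cur with | none => false | some c => c.2.any pvPred)) = true →
    pvAnyBr (pvBLoop lines cur blocks) = true := by
  intro lines
  induction lines with
  | nil =>
    intro cur blocks h
    cases cur with
    | none => simpa [pvBLoop] using h
    | some c =>
      simp only [pvBLoop, pvAnyBr, List.any_append, List.any_cons, List.any_nil]
      simpa [pvAnyBr] using h
  | cons line rest ih =>
    intro cur blocks h
    simp only [pvBLoop]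
    cases cur with
    | none =>
      try dsimp only
      by_cases hs : PySem.Str.startswith (PySem.Str.strip line) "pull_request:" = true
      · rw [if_pos hs]
        exact ih _ _ (by simpa [pvAnyBr] using h)
      · rw [if_neg hs]
        exact ih _ _ (by simpa [pvAnyBr] using h)
    | some c =>
      try dsimp only
      by_cases hs : PySem.Str.startswith (PySem.Str.strip line) "pull_request:" = true
      · rw [if_pos hs]
        refine ih _ _ ?_
        simp only [pvAnyBr, List.any_append, List.any_cons, List.any_nil] at h ⊢
        rcases Bool.or_eq_true_iff.mp h with h' | h' <;> simp [h']
      · rw [if_neg hs]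
        by_cases hcl : (PySem.Str.strip line != "" &&
            decide (PySem.Str.len line - PySem.Str.len (PySem.Str.lstrip line) ≤ c.1)) = true
        · rw [if_pos hcl]
          refine ih _ _ ?_
          simp only [pvAnyBr, List.any_append, List.any_cons, List.any_nil] at h ⊢
          rcases Bool.or_eq_true_iff.mp h with h' | h' <;> simp [h']
        · rw [if_neg hcl]
          refine ih _ _ ?_
          simp only [pvAnyBr, List.any_append, List.any_cons, List.any_nil] at h ⊢
          rcases Bool.or_eq_true_iff.mp h with h' | h' <;> simp [h']

-- Invariant: as long as nothing matching has been collected yet, A's state machine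
-- computes exactly "some collected block will contain a branches line".
lemma pv_loop_eq : ∀ (lines : List String) (cur : Option (Int × List String))
    (blocks : List (List String)),
    pvAnyBr blocks = false →
    (match cur with | none => True | some c => c.2.any pvPred = false) →
    pvALoop lines cur.isSome (cur.map (·.1)) = pvAnyBr (pvBLoop lines cur blocks) := by
  intro lines
  induction lines with
  | nil =>
    intro cur blocks hb hc
    cases cur with
    | none => simp [pvALoop, pvBLoop, hb]
    | some c =>
      simp only [pvALoop, pvBLoop, pvAnyBr, List.any_append, List.any_cons, List.any_nil] at *
      simp [hb, hc]
  | cons line rest ih =>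
    intro cur blocks hb hc
    cases cur with
    | none =>
      simp only [Option.isSome_none, Option.map_none]
      simp only [pvALoop, pvBLoop, Bool.false_eq_true, if_false]
      by_cases hs : PySem.Str.startswith (PySem.Str.strip line) "pull_request:" = true
      · rw [if_pos hs, if_pos hs]
        exact ih (some (_, [])) blocks hb (by simp)
      · rw [if_neg hs, if_neg hs]
        exact ih none blocks hb trivial
    | some c =>
      simp only [Option.isSome_some, Option.map_some]
      simp only [pvALoop, pvBLoop, if_true]
      have hbc : pvAnyBr (blocks ++ [c.2]) = false := by
        simp only [pvAnyBr, List.any_append, List.any_cons, List.any_nil] at *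
        simp [hb, hc]
      by_cases hs : PySem.Str.startswith (PySem.Str.strip line) "pull_request:" = true
      · rw [if_pos hs, if_pos hs]
        exact ih (some (_, [])) (blocks ++ [c.2]) hbc (by simp)
      · rw [if_neg hs, if_neg hs]
        by_cases hcl : (PySem.Str.strip line != "" &&
            decide (PySem.Str.len line - PySem.Str.len (PySem.Str.lstrip line) ≤ c.1)) = true
        · have hclA : (PySem.Str.strip line != "" &&
              decide (PySem.Str.len line - PySem.Str.len (PySem.Str.lstrip line) ≤
                ((some c.1).getD 0))) = true := hcl
          rw [if_pos hclA, if_pos hcl]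
          exact ih none (blocks ++ [c.2]) hbc trivial
        · have hclA : ¬ (PySem.Str.strip line != "" &&
              decide (PySem.Str.len line - PySem.Str.len (PySem.Str.lstrip line) ≤
                ((some c.1).getD 0))) = true := hcl
          rw [if_neg hclA, if_neg hcl]
          by_cases hp : pvPred (PySem.Str.strip line) = true
          · rw [if_pos (by simpa [pvPred] using hp)]
            exact (pvBLoop_persist rest
              (some (c.1, c.2 ++ [PySem.Str.strip line])) blocks
              (by simp [List.any_append, hp])).symm
          · rw [if_neg (by simpa [pvPred] using hp)]
            have hc' : (c.2 ++ [PySem.Str.strip line]).any pvPred = false := by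
              simp only [List.any_append, List.any_cons, List.any_nil] at *
              simp [hc, hp]
            simpa using ih (some (c.1, c.2 ++ [PySem.Str.strip line])) blocks hb hc'

-- ===== VERDICT (by name: the statement is the Claim_ definition above) =====
theorem has_pull_request_branch_filter_py_spec : Claim_equal_has_pull_request_branch_filter_py := by
  intro text _
  show has_pull_request_branch_filter_py text = has_pull_request_branch_filter_py_alt text
  have := pv_loop_eq (PySem.Str.splitlines text) none [] rfl trivial
  simpa [has_pull_request_branch_filter_py, has_pull_request_branch_filter_py_alt, pvAnyBr]
    using this
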